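-- pv_equiv track=rewrite | github.com/CEO-Nick/For-Coding-Test | 프로그래머스/2/12973. 짝지어 제거하기/짝지어 제거하기.py | solution
-- ===== SOURCE A (Python) =====
-- def solution(s):
--     answer = 0
--     stack = []
--
--     for char in s:
--         if stack and stack[-1] == char: # stack에 값이 있고, 마지막 값이 현재 값이랑 같으면
--             stack.pop()
--         else :
--             stack.append(char)
--
--     if stack:
--         answer = 0
--     else :
--         answer = 1
--     return answer
-- ===== SOURCE B (Python) =====
-- def solution(s):
--     # Fixed-point rewriting: repeatedly delete adjacent equal pairs in one
--     # left-to-right sweep until the string stops changing.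
--     while True:
--         out = []
--         i = 0
--         n = len(s)
--         while i < n:
--             if i + 1 < n and s[i] == s[i + 1]:
--                 i += 2
--             else:
--                 out.append(s[i])
--                 i += 1
--         t = ''.join(out)
--         if t == s:
--             break
--         s = t
--     return 1 if s == '' else 0
-- ===== Notes on version B (the rewrite author's own statement) =====
-- stated objective: alternative
-- what changed: Replaced the single-pass stack scan by fixed-point rewriting: repeatedly delete all non-overlapping adjacent equal pairs in one sweep until the string stops changing, then test for emptiness.
import Mathlib
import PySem

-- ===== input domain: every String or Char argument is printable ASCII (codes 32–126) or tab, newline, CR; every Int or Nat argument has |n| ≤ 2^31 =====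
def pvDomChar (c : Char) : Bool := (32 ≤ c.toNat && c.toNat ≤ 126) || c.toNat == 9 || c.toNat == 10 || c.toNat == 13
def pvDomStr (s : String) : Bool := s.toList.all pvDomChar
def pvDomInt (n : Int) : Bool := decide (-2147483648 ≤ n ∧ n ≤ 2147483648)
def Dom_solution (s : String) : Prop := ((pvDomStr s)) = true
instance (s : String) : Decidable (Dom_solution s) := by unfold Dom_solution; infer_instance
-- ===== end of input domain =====

-- B is an ALTERNATIVE algorithm (fixed-point pair rewriting instead of a one-pass stack); same results, not faster.

-- ===== PORT A =====
-- A: one left-to-right pass maintaining a stack (top = last element, as Python's append/pop).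
def solution (s : String) : Int :=
  let stack := s.toList.foldl
    (fun stack char =>
      if stack ≠ [] ∧ stack.getLast? = some char then stack.dropLast  -- stack and stack[-1] == char: stack.pop()
      else stack ++ [char])                                           -- stack.append(char)
    []
  if stack ≠ [] then 0 else 1

-- ===== PORT B =====
-- one sweep of B's inner while-loop: the index scan that drops s[i],s[i+1] when equal
-- (i += 2) and otherwise keeps s[i] (i += 1); structural recursion mirrors the index steps.
def onePassB : List Char → List Char
  | c :: d :: t => if c = d then onePassB t else c :: onePassB (d :: t)
  | l => l

-- needed by loopB's decreasing_by: a changed sweep strictly shrinks the list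
theorem onePassB_shrink : ∀ l : List Char, onePassB l = l ∨ (onePassB l).length < l.length := by
  intro l
  induction l using onePassB.induct with
  | case1 c t ih =>
      right
      rw [show onePassB (c :: c :: t) = onePassB t by simp [onePassB]]
      rcases ih with h | h
      · rw [h]; simp
      · calc (onePassB t).length < t.length := h
          _ < (c :: c :: t).length := by simp
  | case2 c d t ht ih =>
      rw [show onePassB (c :: d :: t) = c :: onePassB (d :: t) by simp [onePassB, ht]]
      rcases ih with h | h
      · left; rw [h]
      · right; simpa using h
  | case3 l h1 =>
      left
      rcases l with _ | ⟨a, _ | ⟨b, t⟩⟩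
      · rfl
      · rfl
      · exact ((h1 a b t rfl)).elim

-- B's outer while True loop: sweep until the list stops changing
def loopB (l : List Char) : List Char :=
  let t := onePassB l
  if t = l then l else loopB t
termination_by l.length
decreasing_by
  rcases onePassB_shrink l with h | h
  · exact absurd h (by assumption)
  · exact h

def solution_alt (s : String) : Int :=
  if loopB s.toList = [] then 1 else 0

-- ===== PRECONDITION & SPEC =====
def Spec_solution (s : String) (out : Int) : Prop := out = solution_alt s
instance (s : String) (out : Int) : Decidable (Spec_solution s out) := by unfold Spec_solution; infer_instance

-- ===== CLAIM (what is proved, stated in full; the proofs are below) =====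
def Claim_equal_solution : Prop := ∀ (s : String), Dom_solution s → Spec_solution s (solution s)

-- ===== LEMMAS AND PROOFS =====

-- reduce one char onto a word from the LEFT
def redL (c : Char) (l : List Char) : List Char :=
  if l.head? = some c then l.tail else c :: l

-- reduce one char onto the RIGHT end (what A's stack step does)
def redR (x : List Char) (c : Char) : List Char :=
  if x.getLast? = some c then x.dropLast else x ++ [c]

-- the normal form: fully reduced word
def nf (l : List Char) : List Char := List.foldr redL [] l

-- A's stack step is redR
theorem stepA_eq_redR :
    (fun (stack : List Char) (char : Char) =>
      if stack ≠ [] ∧ stack.getLast? = some char then stack.dropLast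
      else stack ++ [char]) = redR := by
  funext x c
  unfold redR
  by_cases h : x.getLast? = some c
  · have hx : x ≠ [] := by intro he; subst he; simp at h
    simp [h, hx]
  · simp [h]

-- confluence kernel: left-reduction and right-reduction commute
theorem redLR_comm (d c : Char) (x : List Char) :
    redL d (redR x c) = redR (redL d x) c := by
  match x with
  | [] =>
      simp only [redL, redR]
      by_cases h : c = d
      · subst h; simp
      · have h' : ¬ d = c := fun he => h he.symm
        simp [h, h']
  | [a] =>
      by_cases hac : a = c <;> by_cases had : a = d <;>
        simp_all [redL, redR]
  | a :: b :: y =>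
      by_cases hl : (b :: y).getLast? = some c <;>
        by_cases had : a = d <;>
          simp_all [redL, redR, List.getLast?_cons_cons, List.dropLast]

-- pushing c on the right of the normal form = reducing with [c] as the seed
theorem foldr_redL_singleton (p : List Char) (c : Char) :
    List.foldr redL [c] p = redR (List.foldr redL [] p) c := by
  induction p with
  | nil => simp [redR]
  | cons d q ih => simp only [List.foldr_cons, ih, redLR_comm]

-- A's left-to-right stack computes the normal form
theorem foldl_redR_eq_nf (l : List Char) : List.foldl redR [] l = nf l := by
  induction l using List.reverseRecOn with
  | nil => rfl
  | append_singleton p c ih =>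
      rw [List.foldl_append]
      simp only [List.foldl_cons, List.foldl_nil, ih]
      simp only [nf, List.foldr_append, List.foldr_cons, List.foldr_nil]
      rw [show redL c [] = [c] from rfl, foldr_redL_singleton p c]

-- redL preserves "no two adjacent equal chars"
theorem chain_redL {l : List Char} (c : Char) (h : l.IsChain (· ≠ ·)) :
    (redL c l).IsChain (· ≠ ·) := by
  match l with
  | [] => simp [redL]
  | d :: t =>
      by_cases hdc : d = c
      · simp only [redL, List.head?_cons, hdc, List.tail_cons]
        exact h.tail
      · simp only [redL, List.head?_cons, Option.some.injEq, if_neg hdc]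
        exact List.isChain_cons_cons.mpr ⟨fun he => hdc he.symm, h⟩

theorem chain_nf (l : List Char) : (nf l).IsChain (· ≠ ·) := by
  induction l with
  | nil => simp [nf]
  | cons c t ih => exact chain_redL c ih

-- on a reduced word, redL c is an involution
theorem redL_invol {l : List Char} (c : Char) (h : l.IsChain (· ≠ ·)) :
    redL c (redL c l) = l := by
  match l with
  | [] => simp [redL]
  | d :: t =>
      by_cases hdc : d = c
      · subst hdc
        simp only [redL, List.head?_cons, List.tail_cons]
        match t with
        | [] => simp
        | e :: t' =>
            have hne : d ≠ e := (List.isChain_cons_cons.mp h).1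
            have hne' : ¬ e = d := fun he => hne he.symm
            simp [hne']
      · simp [redL, hdc]

-- one sweep does not change the normal form
theorem nf_onePassB (l : List Char) : nf (onePassB l) = nf l := by
  induction l using onePassB.induct with
  | case1 c t ih =>
      rw [show onePassB (c :: c :: t) = onePassB t by simp [onePassB], ih]
      show nf t = nf (c :: c :: t)
      simp only [nf, List.foldr_cons]
      exact (redL_invol c (chain_nf t)).symm
  | case2 c d t ht ih =>
      simp only [onePassB, if_neg ht, nf, List.foldr_cons]
      exact congrArg (redL c) ih
  | case3 l h1 =>
      rcases l with _ | ⟨a, _ | ⟨b, t⟩⟩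
      · rfl
      · rfl
      · exact ((h1 a b t rfl)).elim

-- a reduced word is its own normal form
theorem nf_of_chain {l : List Char} (h : l.IsChain (· ≠ ·)) : nf l = l := by
  induction l with
  | nil => rfl
  | cons c t ih =>
      simp only [nf, List.foldr_cons] at *
      rw [ih h.tail]
      match t with
      | [] => simp [redL]
      | e :: t' =>
          have hce : c ≠ e := (List.isChain_cons_cons.mp h).1
          have hce' : ¬ e = c := fun he => hce he.symm
          simp [redL, hce']

-- a fixpoint of the sweep is reduced
theorem chain_of_fix : ∀ l : List Char, onePassB l = l → l.IsChain (· ≠ ·) := by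
  intro l
  induction l using onePassB.induct with
  | case1 c t ih =>
      intro hfix
      exfalso
      rw [show onePassB (c :: c :: t) = onePassB t by simp [onePassB]] at hfix
      have hlen : (onePassB t).length = t.length + 2 := by rw [hfix]; simp
      rcases onePassB_shrink t with h | h
      · rw [h] at hlen; omega
      · omega
  | case2 c d t ht ih =>
      intro hfix
      rw [show onePassB (c :: d :: t) = c :: onePassB (d :: t) by simp [onePassB, ht]] at hfix
      have h2 : onePassB (d :: t) = d :: t := by
        injection hfix
      exact List.isChain_cons_cons.mpr ⟨ht, ih h2⟩
  | case3 l h1 =>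
      intro _
      rcases l with _ | ⟨a, _ | ⟨b, t⟩⟩
      · simp
      · simp
      · exact ((h1 a b t rfl)).elim

-- the outer loop returns the normal form
theorem loopB_eq_nf (l : List Char) : loopB l = nf l := by
  have H : ∀ n (l : List Char), l.length ≤ n → loopB l = nf l := by
    intro n
    induction n with
    | zero =>
        intro l hl
        have h0 : l = [] := List.eq_nil_of_length_eq_zero (by omega)
        subst h0
        rw [loopB]
        rfl
    | succ n ih =>
        intro l hl
        rw [loopB]
        by_cases h : onePassB l = l
        · simp only [if_pos h]
          exact (nf_of_chain (chain_of_fix l h)).symm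
        · simp only [if_neg h]
          have hlt : (onePassB l).length < l.length := by
            rcases onePassB_shrink l with h' | h'
            · exact absurd h' h
            · exact h'
          rw [ih (onePassB l) (by omega), nf_onePassB]
  exact H l.length l le_rfl

-- ===== VERDICT (by name: the statement is the Claim_ definition above) =====
theorem solution_spec : Claim_equal_solution := by
  intro s _
  unfold Spec_solution solution solution_alt
  rw [stepA_eq_redR, foldl_redR_eq_nf, loopB_eq_nf]
  by_cases h : nf s.toList = []
  · simp [h]
  · simp [h]
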